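-- pv_equiv track=rewrite | github.com/kalyaniasthana/FindingMutationsInDNAAndProteins_BioinformaticsVI | w_3.py | count_of_symbol_matrix
-- ===== SOURCE A (Python) =====
-- def count_of_symbol_matrix(last_column):
--
-- 	symbols = list(set(last_column))
-- 	symbols.sort()
-- 	nums = [i for i in range(len(symbols))]
-- 	x = zip(symbols, nums)
-- 	symbols_dict = dict(x)
-- 	count = []
-- 	for symbol in symbols:
-- 		l = [0]
-- 		for i in range(len(last_column)):
-- 			if last_column[i] == symbol:
-- 				l.append(l[i] + 1)
-- 			else:
-- 				l.append(l[i])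
-- 		count.append(l)
-- 	return count, symbols_dict
-- ===== SOURCE B (Python) =====
-- def count_of_symbol_matrix(last_column):
--     symbols = sorted(set(last_column))
--     symbols_dict = {s: i for i, s in enumerate(symbols)}
--     running = dict.fromkeys(symbols, 0)
--     count = [[0] for _ in symbols]
--     for ch in last_column:
--         running[ch] += 1
--         for row, s in zip(count, symbols):
--             row.append(running[s])
--     return count, symbols_dict
-- ===== Notes on version B (the rewrite author's own statement) =====
-- stated objective: alternative
-- what changed: A makes one full scan of last_column per distinct symbol; B makes a single pass over last_column, maintaining a running count per symbol in a dict and extending every symbol's row at each step.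
import Mathlib
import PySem

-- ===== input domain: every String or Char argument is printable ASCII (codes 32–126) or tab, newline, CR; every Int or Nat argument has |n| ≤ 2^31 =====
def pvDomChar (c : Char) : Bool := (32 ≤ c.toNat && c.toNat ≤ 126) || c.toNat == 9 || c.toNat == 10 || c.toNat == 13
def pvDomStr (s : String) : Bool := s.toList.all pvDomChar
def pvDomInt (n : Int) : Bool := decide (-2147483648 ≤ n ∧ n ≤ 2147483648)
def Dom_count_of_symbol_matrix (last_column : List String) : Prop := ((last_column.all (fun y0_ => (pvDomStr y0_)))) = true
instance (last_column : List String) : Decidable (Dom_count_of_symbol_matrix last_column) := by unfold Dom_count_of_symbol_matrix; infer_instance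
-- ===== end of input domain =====

-- B replaces A's one-full-scan-per-symbol construction by a single pass over the column that keeps a
-- running count per symbol in a dict and extends every symbol's row at each step (alternative decomposition, same cost).

-- ===== PORT A =====
def count_of_symbol_matrix (last_column : List String) : List (List Int) × (List (String × Int)) :=
  let symbols : List String := PySem.List.sorted (PySem.Set.ofList last_column) (fun x => x) false
  let nums : List Int := PySem.List.pyRange 0 (symbols.length : Int) 1
  let symbols_dict : PySem.Dict String Int := PySem.Dict.ofList (symbols.zip nums)
  let count : List (List Int) := symbols.foldl (fun count symbol =>
    let l : List Int := (PySem.List.pyRange 0 (last_column.length : Int) 1).foldl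
      (fun l i =>
        if PySem.List.pyGetD last_column i "" = symbol then
          l ++ [PySem.List.pyGetD l i 0 + 1]
        else
          l ++ [PySem.List.pyGetD l i 0]) [0]
    count ++ [l]) []
  (count, symbols_dict.items)

-- ===== PORT B =====
def count_of_symbol_matrix_alt (last_column : List String) : List (List Int) × (List (String × Int)) :=
  let symbols : List String := PySem.List.sorted (PySem.Set.ofList last_column) (fun x => x) false
  let symbols_dict : PySem.Dict String Int :=
    PySem.Dict.ofList ((PySem.List.enumerate symbols 0).map (fun p => (p.2, p.1)))
  let running0 : PySem.Dict String Int := PySem.Dict.ofList (symbols.map (fun s => (s, (0:Int))))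
  let st := last_column.foldl
    (fun (st : List (List Int) × PySem.Dict String Int) ch =>
      let running := st.2.modify ch 0 (· + 1)
      ((st.1.zip symbols).map (fun p => p.1 ++ [running.getD p.2 0]), running))
    (symbols.map (fun _ => [(0:Int)]), running0)
  (st.1, symbols_dict.items)

-- ===== PRECONDITION & SPEC =====
def Spec_count_of_symbol_matrix (last_column : List String) (out : List (List Int) × (List (String × Int))) : Prop := out = count_of_symbol_matrix_alt last_column
instance (last_column : List String) (out : List (List Int) × (List (String × Int))) : Decidable (Spec_count_of_symbol_matrix last_column out) := by unfold Spec_count_of_symbol_matrix; infer_instance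

-- ===== CLAIM (what is proved, stated in full; the proofs are below) =====
def Claim_equal_count_of_symbol_matrix : Prop := ∀ (last_column : List String), Dom_count_of_symbol_matrix last_column → Spec_count_of_symbol_matrix last_column (count_of_symbol_matrix last_column)

-- ===== LEMMAS AND PROOFS =====

-- The running-count scan both programs compute: given count-so-far c of symbol s, the row tail over the rest of the column.
def rowSpec (s : String) : Int → List String → List Int
  | _, [] => []
  | c, x :: xs => let c' := if x = s then c + 1 else c; c' :: rowSpec s c' xs

lemma rowSpec_append_singleton (s x : String) : ∀ (p : List String) (c : Int),
    rowSpec s c (p ++ [x]) = rowSpec s c p ++ [c + ((p ++ [x]).count s : Int)] := by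
  intro p
  induction p with
  | nil =>
      intro c
      by_cases h : x = s <;> simp [rowSpec, h]
  | cons y p ih =>
      intro c
      simp only [List.cons_append, rowSpec]
      rw [ih]
      have hc : ((y :: (p ++ [x])).count s : Int) = ((p ++ [x]).count s : Int) + (if y = s then 1 else 0) := by
        rw [List.count_cons]; by_cases h : y = s <;> simp [h]
      rw [hc]
      by_cases h : y = s <;> simp [h] <;> ring

-- A's inner loop, started after the processed prefix `pre` with the current row `l` ending in the running count `c`,
-- appends exactly the running-count scan of the remaining suffix.
lemma inner_go (s : String) (xs : List String) : ∀ (suf pre : List String) (l : List Int) (c : Int),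
    xs = pre ++ suf → l.length = pre.length + 1 → l.getLast?.getD 0 = c →
    (PySem.List.pyRange (pre.length : Int) (xs.length : Int) 1).foldl
      (fun l i => if PySem.List.pyGetD xs i "" = s then l ++ [PySem.List.pyGetD l i 0 + 1]
                  else l ++ [PySem.List.pyGetD l i 0]) l
    = l ++ rowSpec s c suf := by
  intro suf
  induction suf with
  | nil =>
      intro pre l c hxs hlen hlast
      rw [PySem.List.pyRange_one_eq_nil (by simp [hxs])]
      simp [rowSpec]
  | cons x rest ih =>
      intro pre l c hxs hlen hlast
      have hlt : (pre.length : Int) < (xs.length : Int) := by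
        subst hxs; simp only [List.length_append, List.length_cons]; push_cast; omega
      rw [PySem.List.pyRange_one_cons hlt]
      simp only [List.foldl_cons]
      have hx : PySem.List.pyGetD xs (pre.length : Int) "" = x := by
        subst hxs
        rw [PySem.List.pyGetD_natCast]
        simp [List.getD, List.getElem?_append_right]
      have hl : PySem.List.pyGetD l (pre.length : Int) 0 = c := by
        rw [PySem.List.pyGetD_natCast]
        have : l.getD pre.length 0 = l.getLast?.getD 0 := by
          rw [List.getLast?_eq_getElem?]
          simp [List.getD, hlen]
        rw [this, hlast]
      rw [hx, hl]
      have hstep : (if x = s then l ++ [c + 1] else l ++ [c]) = l ++ [if x = s then c + 1 else c] := by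
        split_ifs <;> rfl
      rw [hstep]
      have hcast : (pre.length : Int) + 1 = ((pre ++ [x]).length : Int) := by push_cast; simp
      rw [hcast]
      rw [ih (pre ++ [x]) (l ++ [if x = s then c + 1 else c]) (if x = s then c + 1 else c)
          (by simp [hxs]) (by simp [hlen]) (by simp)]
      simp [rowSpec]

-- A's inner loop computes the running-count scan of the whole column, prefixed by 0.
lemma innerA_eq (s : String) (xs : List String) :
    (PySem.List.pyRange 0 (xs.length : Int) 1).foldl
      (fun l i =>
        if PySem.List.pyGetD xs i "" = s then
          l ++ [PySem.List.pyGetD l i 0 + 1]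
        else
          l ++ [PySem.List.pyGetD l i 0]) [0]
    = 0 :: rowSpec s 0 xs := by
  have h := inner_go s xs xs [] [0] 0 (by simp) (by simp) (by simp)
  simpa using h

-- dict.fromkeys(symbols, 0) looks up as 0 everywhere.
lemma getD_update_zero (l : List String) : ∀ (d : PySem.Dict String Int) (s : String),
    (∀ k, d.getD k 0 = 0) → (d.update (l.map (fun t => (t, (0:Int))))).getD s 0 = 0 := by
  induction l with
  | nil => intro d s h; simpa [PySem.Dict.update] using h s
  | cons x l ih =>
      intro d s h
      simp only [List.map_cons, PySem.Dict.update, List.foldl_cons]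
      have := ih (d.insert x 0) s (fun k => by rw [PySem.Dict.getD_insert]; split_ifs <;> simp [h])
      simpa [PySem.Dict.update] using this

lemma getD_init (l : List String) (s : String) :
    (PySem.Dict.ofList (l.map (fun t => (t, (0:Int))))).getD s 0 = 0 :=
  getD_update_zero l PySem.Dict.empty s (fun _ => by simp)

lemma zip_self_map {α β : Type} (f : α → β) (l : List α) :
    (l.map f).zip l = l.map (fun a => (f a, a)) := by
  induction l with
  | nil => rfl
  | cons x l ih => simp [ih]

-- B's main loop maintains every symbol's row (0 followed by the running-count scan of the processed prefix)
-- together with the running counts.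
lemma foldB_eq (symbols : List String) (xs : List String) :
    (xs.foldl
      (fun (st : List (List Int) × PySem.Dict String Int) ch =>
        let running := st.2.modify ch 0 (· + 1)
        ((st.1.zip symbols).map (fun p => p.1 ++ [running.getD p.2 0]), running))
      (symbols.map (fun _ => [(0:Int)]), PySem.Dict.ofList (symbols.map (fun s => (s, (0:Int))))))
    = (symbols.map (fun s => 0 :: rowSpec s 0 xs),
       xs.foldl (fun d x => d.modify x 0 (· + 1))
         (PySem.Dict.ofList (symbols.map (fun s => (s, (0:Int)))))) := by
  induction xs using List.reverseRecOn with
  | nil => simp [rowSpec]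
  | append_singleton xs x ih =>
      rw [List.foldl_append, List.foldl_append, ih]
      simp only [List.foldl_cons, List.foldl_nil]
      refine Prod.ext ?_ rfl
      simp only []
      rw [zip_self_map]
      rw [List.map_map]
      apply List.map_congr_left
      intro s _
      simp only [Function.comp]
      rw [PySem.Dict.getD_modify, PySem.Dict.getD_foldl_modify_add_one, getD_init,
          PySem.Dict.getD_foldl_modify_add_one, getD_init]
      have hr := rowSpec_append_singleton s x xs 0
      rw [hr]
      have hc : ((xs ++ [x]).count s : Int) = (xs.count s : Int) + (if s = x then 1 else 0) := by
        rw [List.count_append, List.count_singleton]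
        by_cases h : x = s
        · simp [h]
        · have h2 : ¬ s = x := fun hh => h hh.symm
          simp [h, h2]
      rw [hc]
      by_cases h : s = x <;> simp [h]

-- dict(zip(symbols, range(len(symbols)))) = {s: i for i, s in enumerate(symbols)}
lemma enum_swap_eq_zip (xs : List String) : ∀ (a : Int),
    (PySem.List.enumerate xs a).map (fun p => (p.2, p.1)) = xs.zip (PySem.List.pyRange a (a + xs.length) 1) := by
  induction xs with
  | nil => intro a; simp [PySem.List.enumerate]
  | cons x xs ih =>
      intro a
      have hlt : a < a + ((x :: xs).length : Int) := by
        simp only [List.length_cons]; push_cast; omega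
      rw [PySem.List.pyRange_one_cons hlt]
      simp only [PySem.List.enumerate, List.map_cons, List.zip_cons_cons]
      have : a + ((x :: xs).length : Int) = (a + 1) + (xs.length : Int) := by
        simp only [List.length_cons]; push_cast; ring
      rw [this, ← ih (a + 1)]

-- ===== VERDICT (by name: the statement is the Claim_ definition above) =====
theorem count_of_symbol_matrix_spec : Claim_equal_count_of_symbol_matrix := by
  intro last_column _
  unfold Spec_count_of_symbol_matrix count_of_symbol_matrix count_of_symbol_matrix_alt
  simp only [foldB_eq, PySem.List.foldl_append_singleton_eq_map, List.nil_append, innerA_eq,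
    enum_swap_eq_zip]
  simp
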